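-- pv_equiv track=rewrite | github.com/DeeKahy/Project-Choice-Maxxing | voting-app/algorithms.py | star_voting
-- ===== SOURCE A (Python) =====
-- def score_voting(parsed_votes, option_names):
--     """Simple sum of scores"""
--     totals = {name: 0 for name in option_names}
--     for vote in parsed_votes:
--         for name, score in vote["scores"].items():
--             totals[name] += score
--     return sorted(totals.items(), reverse=True, key=lambda x: x[1])
--
-- def star_voting(parsed_votes, option_names):
--     """Score Then Automatic Runoff (STAR) method"""
--     # this method sorts candidates by total score, then considers the top two candidates to find a winner
--     # We already have a method to rank candidates by score, so we'll use that
--     options = score_voting(parsed_votes, option_names)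
--     ranking = []
--     for _ in range(len(options) - 1):
--         # out of the top two options, the winner is the one with the higher score on the most ballots
--         A, _ = options[0]
--         B, _ = options[1]
--         A_wins = 0
--         B_wins = 0
--         for ballot in parsed_votes:
--             if ballot["scores"][A] > ballot["scores"][B]:
--                 A_wins += 1
--             elif ballot["scores"][A] < ballot["scores"][B]:
--                 B_wins += 1
--         if A_wins >= B_wins:
--             # add the winner to the final ranking and remove it from the options to give the others a chance
--             del options[0]
--             ranking.append((A, A_wins))
--             if len(options) == 1:
--                 # put the other option at the end so it's included even if it never won, if it's the only one left
--                 ranking.append((B, B_wins))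
--         else:
--             del options[1]
--             ranking.append((B, B_wins))
--             if len(options) == 1:
--                 ranking.append((A, A_wins))
--     return ranking
-- ===== SOURCE B (Python) =====
-- def star_voting(parsed_votes, option_names):
--     """STAR: score ranking, then a runoff chain read off a precomputed pairwise-preference matrix."""
--     totals = {name: 0 for name in option_names}
--     for vote in parsed_votes:
--         for name, score in vote["scores"].items():
--             totals[name] += score
--     order = sorted(totals.items(), reverse=True, key=lambda x: x[1])
--     names = [name for name, _ in order]
--     if len(names) < 2:
--         return []
--     # one nested pass over all ballots: P[(a, b)] = #ballots scoring a strictly above b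
--     P = {}
--     for ballot in parsed_votes:
--         s = ballot["scores"]
--         for a in names:
--             for b in names:
--                 if s[a] > s[b]:
--                     P[(a, b)] = P.get((a, b), 0) + 1
--     def chain(opts):
--         a, b = opts[0], opts[1]
--         a_wins, b_wins = P.get((a, b), 0), P.get((b, a), 0)
--         if a_wins >= b_wins:
--             win, wwins, lose, lwins, rest = a, a_wins, b, b_wins, opts[1:]
--         else:
--             win, wwins, lose, lwins, rest = b, b_wins, a, a_wins, [a] + opts[2:]
--         if len(rest) == 1:
--             return [(win, wwins), (lose, lwins)]
--         return [(win, wwins)] + chain(rest)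
--     return chain(names)
-- ===== Notes on version B (the rewrite author's own statement) =====
-- stated objective: alternative
-- what changed: B precomputes a pairwise strict-preference matrix in one nested pass over the ballots and replaces A's imperative runoff loop (which rescans every ballot for each top-two pair) by a recursive elimination chain that only reads matrix entries.
import Mathlib
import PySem

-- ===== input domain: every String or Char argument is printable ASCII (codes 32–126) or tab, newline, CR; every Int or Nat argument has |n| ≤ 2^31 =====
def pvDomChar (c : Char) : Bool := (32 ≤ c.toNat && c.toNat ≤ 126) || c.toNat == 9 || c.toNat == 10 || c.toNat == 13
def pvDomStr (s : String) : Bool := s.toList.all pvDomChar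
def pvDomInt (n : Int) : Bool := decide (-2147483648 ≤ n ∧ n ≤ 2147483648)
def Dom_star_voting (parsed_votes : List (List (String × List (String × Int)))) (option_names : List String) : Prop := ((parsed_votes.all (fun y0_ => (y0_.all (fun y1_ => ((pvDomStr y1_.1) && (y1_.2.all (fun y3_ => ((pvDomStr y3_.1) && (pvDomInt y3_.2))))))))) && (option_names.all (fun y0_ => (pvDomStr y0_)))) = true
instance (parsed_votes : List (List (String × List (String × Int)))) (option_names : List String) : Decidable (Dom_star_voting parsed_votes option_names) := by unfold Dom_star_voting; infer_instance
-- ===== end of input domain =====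

-- B replaces A's per-round rescan of all ballots by a pairwise-preference matrix built in one
-- nested pass plus a recursive runoff chain over the score ranking (alternative decomposition).


-- shared accessor: ballot["scores"] (total stand-in: the missing-key KeyError is excluded by Pre_)
def pvScores (ballot : List (String × List (String × Int))) : List (String × Int) :=
  (PySem.Dict.mk ballot).getD "scores" []

-- ===== PORT A =====
-- score_voting: totals dict over option_names, add each ballot's scores, sort items by value descending
def score_voting (parsed_votes : List (List (String × List (String × Int)))) (option_names : List String) : List (String × Int) :=
  let totals : PySem.Dict String Int := option_names.foldl (fun d name => d.insert name 0) PySem.Dict.empty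
  -- totals[name] += score; the KeyError on a name outside totals is excluded by Pre_
  let totals := parsed_votes.foldl (fun t vote => (pvScores vote).foldl (fun t p => t.modify p.1 0 (· + p.2)) t) totals
  PySem.List.sorted totals.items (fun x => x.2) true

-- one iteration of A's runoff loop over the state (options, ranking)
def pvStepA (parsed_votes : List (List (String × List (String × Int))))
    (st : List (String × Int) × List (String × Int)) : List (String × Int) × List (String × Int) :=
  match st.1 with
  | Ap :: Bp :: rest =>
    let A := Ap.1
    let B := Bp.1
    -- ballot["scores"][A] / [B]: the KeyError on a missing candidate is excluded by Pre_
    let wins := parsed_votes.foldl (fun w ballot =>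
        let s := PySem.Dict.mk (pvScores ballot)
        if s.getD A 0 > s.getD B 0 then (w.1 + 1, w.2)
        else if s.getD A 0 < s.getD B 0 then (w.1, w.2 + 1)
        else w) ((0 : Int), (0 : Int))
    if wins.1 ≥ wins.2 then
      let options' := Bp :: rest                        -- del options[0]
      let ranking' := st.2 ++ [(A, wins.1)]
      if options'.length == 1 then (options', ranking' ++ [(B, wins.2)]) else (options', ranking')
    else
      let options' := Ap :: rest                        -- del options[1]
      let ranking' := st.2 ++ [(B, wins.2)]
      if options'.length == 1 then (options', ranking' ++ [(A, wins.1)]) else (options', ranking')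
  | _ => st  -- unreachable totality guard: the loop keeps len(options) ≥ 2

-- 'for _ in range(len(options) - 1)': iterate pvStepA that many times
def pvLoopA (parsed_votes : List (List (String × List (String × Int)))) :
    Nat → List (String × Int) × List (String × Int) → List (String × Int) × List (String × Int)
  | 0, st => st
  | k + 1, st => pvLoopA parsed_votes k (pvStepA parsed_votes st)

def star_voting (parsed_votes : List (List (String × List (String × Int)))) (option_names : List String) : List (String × Int) :=
  let options := score_voting parsed_votes option_names
  (pvLoopA parsed_votes (options.length - 1) (options, [])).2

-- ===== PORT B =====
-- recursive runoff chain reading win counts from the pairwise matrix P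
def pvChainB (P : PySem.Dict (String × String) Int) : List String → List (String × Int)
  | a :: b :: rest =>
    let a_wins := P.getD (a, b) 0
    let b_wins := P.getD (b, a) 0
    if a_wins ≥ b_wins then
      if (b :: rest).length == 1 then [(a, a_wins), (b, b_wins)]
      else (a, a_wins) :: pvChainB P (b :: rest)
    else
      if (a :: rest).length == 1 then [(b, b_wins), (a, a_wins)]
      else (b, b_wins) :: pvChainB P (a :: rest)
  | _ => []
termination_by l => l.length
decreasing_by all_goals simp

def star_voting_alt (parsed_votes : List (List (String × List (String × Int)))) (option_names : List String) : List (String × Int) :=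
  let totals : PySem.Dict String Int := option_names.foldl (fun d name => d.insert name 0) PySem.Dict.empty
  let totals := parsed_votes.foldl (fun t vote => (pvScores vote).foldl (fun t p => t.modify p.1 0 (· + p.2)) t) totals
  let order := PySem.List.sorted totals.items (fun x => x.2) true
  let names := order.map (fun p => p.1)
  if names.length < 2 then []
  else
    -- one nested pass: P[(a,b)] = number of ballots scoring a strictly above b
    let P : PySem.Dict (String × String) Int := parsed_votes.foldl (fun P ballot =>
        let s := PySem.Dict.mk (pvScores ballot)
        names.foldl (fun P a => names.foldl (fun P b =>
            if s.getD a 0 > s.getD b 0 then P.insert (a, b) (P.getD (a, b) 0 + 1) else P) P) P)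
      PySem.Dict.empty
    pvChainB P names

-- ===== PRECONDITION & SPEC =====
-- Pre_ excludes exactly Python A's KeyErrors: a ballot without a "scores" key, a scored name
-- outside option_names, and (when there are at least two distinct candidates, so the runoff
-- actually looks candidates up) a ballot not scoring every candidate.
def Pre_star_voting (parsed_votes : List (List (String × List (String × Int)))) (option_names : List String) : Prop :=
  ∀ vote ∈ parsed_votes,
    (PySem.Dict.mk vote).contains "scores" = true ∧
    (∀ p ∈ pvScores vote, p.1 ∈ option_names) ∧
    (2 ≤ (PySem.Set.ofList option_names).length → ∀ name ∈ option_names, name ∈ (pvScores vote).map Prod.fst)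
instance (parsed_votes : List (List (String × List (String × Int)))) (option_names : List String) : Decidable (Pre_star_voting parsed_votes option_names) := by unfold Pre_star_voting; infer_instance

def pvWitness_star_voting : (List (List (String × List (String × Int)))) × List String :=
  ([[("scores", [("x", 3), ("y", 1)])], [("scores", [("x", 0), ("y", 2)])]], ["x", "y"])

def Spec_star_voting (parsed_votes : List (List (String × List (String × Int)))) (option_names : List String) (out : List (String × Int)) : Prop := out = star_voting_alt parsed_votes option_names
instance (parsed_votes : List (List (String × List (String × Int)))) (option_names : List String) (out : List (String × Int)) : Decidable (Spec_star_voting parsed_votes option_names out) := by unfold Spec_star_voting; infer_instance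

-- ===== CLAIM (what is proved, stated in full; the proofs are below) =====
def Claim_equal_star_voting : Prop := ∀ (parsed_votes : List (List (String × List (String × Int)))) (option_names : List String), Dom_star_voting parsed_votes option_names → Pre_star_voting parsed_votes option_names → Spec_star_voting parsed_votes option_names (star_voting parsed_votes option_names)

-- ===== LEMMAS AND PROOFS =====

-- the strict-preference test both programs apply to a ballot
def pvGT (x y : String) (ballot : List (String × List (String × Int))) : Bool :=
  (PySem.Dict.mk (pvScores ballot)).getD x 0 > (PySem.Dict.mk (pvScores ballot)).getD y 0

lemma pvFoldA_count (parsed : List (List (String × List (String × Int)))) (x y : String) (a b : Int) :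
    parsed.foldl (fun w ballot =>
        let s := PySem.Dict.mk (pvScores ballot)
        if s.getD x 0 > s.getD y 0 then (w.1 + 1, w.2)
        else if s.getD x 0 < s.getD y 0 then (w.1, w.2 + 1)
        else w) (a, b)
      = (a + (parsed.countP (pvGT x y) : Int), b + (parsed.countP (pvGT y x) : Int)) := by
  induction parsed generalizing a b with
  | nil => simp
  | cons ballot t ih =>
    simp only [List.foldl_cons, List.countP_cons, pvGT]
    by_cases h1 : (PySem.Dict.mk (pvScores ballot)).getD x 0 > (PySem.Dict.mk (pvScores ballot)).getD y 0
    · simp [h1, ih, not_lt.mpr (le_of_lt h1)]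
      ring
    · by_cases h2 : (PySem.Dict.mk (pvScores ballot)).getD x 0 < (PySem.Dict.mk (pvScores ballot)).getD y 0
      · simp [h1, h2, ih]
        ring
      · simp [h1, h2, ih]

lemma pvInner_getD (l : List String) (hl : l.Nodup) (a x y : String) (g : String → Prop) [DecidablePred g]
    (P : PySem.Dict (String × String) Int) :
    (l.foldl (fun P b => if g b then P.insert (a, b) (P.getD (a, b) 0 + 1) else P) P).getD (x, y) 0
      = P.getD (x, y) 0 + (if a = x ∧ y ∈ l ∧ g y then 1 else 0) := by
  induction l generalizing P with
  | nil => simp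
  | cons b t ih =>
    obtain ⟨hbt, hnd⟩ := List.nodup_cons.mp hl
    simp only [List.foldl_cons]
    rw [ih hnd]
    by_cases hg : g b
    · rw [if_pos hg, PySem.Dict.getD_insert]
      by_cases hax : a = x
      · subst hax
        by_cases hyb : y = b
        · subst hyb
          have h1 : ¬ (a = a ∧ y ∈ t ∧ g y) := fun h => hbt h.2.1
          have h2 : (a = a ∧ y ∈ y :: t ∧ g y) := ⟨rfl, List.mem_cons_self .., hg⟩
          have h3 : ((a : String), (y : String)) = (a, y) := rfl
          rw [if_pos h3, if_neg h1, if_pos h2]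
          ring
        · have h3 : ¬ (((a : String), (y : String)) = (a, b)) := by
            simp [Prod.ext_iff, hyb]
          rw [if_neg h3]
          simp [List.mem_cons, hyb]
      · have h3 : ¬ (((x : String), (y : String)) = (a, b)) := by
          simp [Prod.ext_iff]; intro h; exact absurd h.symm hax
        rw [if_neg h3]
        simp [hax]
    · rw [if_neg hg]
      by_cases hyb : y = b
      · subst hyb
        have hgy : ¬ (g y) := hg
        simp [hgy, hbt]
      · simp [List.mem_cons, hyb]

lemma pvOuter_getD (l names : List String) (hl : l.Nodup) (hn : names.Nodup) (x y : String)
    (s : PySem.Dict String Int) (P : PySem.Dict (String × String) Int) :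
    (l.foldl (fun P a => names.foldl (fun P b =>
        if s.getD a 0 > s.getD b 0 then P.insert (a, b) (P.getD (a, b) 0 + 1) else P) P) P).getD (x, y) 0
      = P.getD (x, y) 0 + (if x ∈ l ∧ y ∈ names ∧ s.getD x 0 > s.getD y 0 then 1 else 0) := by
  induction l generalizing P with
  | nil => simp
  | cons hd t ih =>
    obtain ⟨hht, hnd⟩ := List.nodup_cons.mp hl
    simp only [List.foldl_cons]
    rw [ih hnd, pvInner_getD names hn hd x y (fun b => s.getD hd 0 > s.getD b 0) P]
    by_cases hx : hd = x
    · subst hx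
      have h1 : ¬ (hd ∈ t ∧ y ∈ names ∧ s.getD hd 0 > s.getD y 0) := fun h => hht h.1
      by_cases hA : y ∈ names ∧ s.getD hd 0 > s.getD y 0
      · have h2 : (hd = hd ∧ y ∈ names ∧ s.getD hd 0 > s.getD y 0) := ⟨rfl, hA⟩
        have h3 : (hd ∈ hd :: t ∧ y ∈ names ∧ s.getD hd 0 > s.getD y 0) := ⟨List.mem_cons_self .., hA⟩
        rw [if_neg h1, if_pos h2, if_pos h3]; ring
      · have h2 : ¬ (hd = hd ∧ y ∈ names ∧ s.getD hd 0 > s.getD y 0) := fun h => hA h.2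
        have h3 : ¬ (hd ∈ hd :: t ∧ y ∈ names ∧ s.getD hd 0 > s.getD y 0) := fun h => hA h.2
        rw [if_neg h1, if_neg h2, if_neg h3]
        ring
    · have hx' : ¬ x = hd := fun h => hx h.symm
      simp [hx, hx', List.mem_cons]

lemma pvMatrix_getD (parsed : List (List (String × List (String × Int)))) (names : List String)
    (hn : names.Nodup) (x y : String) (hx : x ∈ names) (hy : y ∈ names)
    (P : PySem.Dict (String × String) Int) :
    (parsed.foldl (fun P ballot =>
        let s := PySem.Dict.mk (pvScores ballot)
        names.foldl (fun P a => names.foldl (fun P b =>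
            if s.getD a 0 > s.getD b 0 then P.insert (a, b) (P.getD (a, b) 0 + 1) else P) P) P) P).getD (x, y) 0
      = P.getD (x, y) 0 + (parsed.countP (pvGT x y) : Int) := by
  induction parsed generalizing P with
  | nil => simp
  | cons ballot t ih =>
    simp only [List.foldl_cons]
    rw [ih, pvOuter_getD names names hn hn x y (PySem.Dict.mk (pvScores ballot)) P]
    rw [List.countP_cons]
    by_cases h : (PySem.Dict.mk (pvScores ballot)).getD x 0 > (PySem.Dict.mk (pvScores ballot)).getD y 0
    · have hb : pvGT x y ballot = true := by simp [pvGT, h]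
      rw [if_pos ⟨hx, hy, h⟩, hb]
      simp
      ring
    · have hb : ¬ (pvGT x y ballot = true) := by simp [pvGT]; exact not_lt.mp h
      have h2 : ¬ (x ∈ names ∧ y ∈ names ∧ (PySem.Dict.mk (pvScores ballot)).getD x 0 > (PySem.Dict.mk (pvScores ballot)).getD y 0) := fun hh => h hh.2.2
      rw [if_neg h2]
      simp [hb]

lemma pvLoop_eq_chain (parsed : List (List (String × List (String × Int)))) (names : List String)
    (P : PySem.Dict (String × String) Int)
    (hP : ∀ x ∈ names, ∀ y ∈ names, P.getD (x, y) 0 = (parsed.countP (pvGT x y) : Int)) :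
    ∀ (k : Nat) (opts : List (String × Int)) (ranking : List (String × Int)),
      opts.length = k + 1 → (∀ p ∈ opts, p.1 ∈ names) →
      (pvLoopA parsed k (opts, ranking)).2 = ranking ++ pvChainB P (opts.map (fun p => p.1)) := by
  intro k
  induction k with
  | zero =>
    intro opts ranking hlen hmem
    obtain ⟨p, rfl⟩ := List.length_eq_one_iff.mp hlen
    simp [pvLoopA, pvChainB]
  | succ k ih =>
    intro opts ranking hlen hmem
    match opts, hlen with
    | Ap :: Bp :: rest, hlen =>
      have hA : Ap.1 ∈ names := hmem _ (by simp)
      have hB : Bp.1 ∈ names := hmem _ (by simp)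
      have hPab := hP _ hA _ hB
      have hPba := hP _ hB _ hA
      simp only [pvLoopA, pvStepA]
      rw [pvFoldA_count parsed Ap.1 Bp.1 0 0]
      simp only [zero_add]
      by_cases hw : ((parsed.countP (pvGT Ap.1 Bp.1) : Int)) ≥ ((parsed.countP (pvGT Bp.1 Ap.1) : Int))
      · rw [if_pos hw]
        cases rest with
        | nil =>
          have hk : k = 0 := by simpa using hlen
          subst hk
          simp only [List.length, pvLoopA]
          simp [pvChainB, hPab, hPba, hw]
        | cons c cs =>
          have hlen' : (Bp :: c :: cs).length = k + 1 := by simpa using hlen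
          rw [if_neg (by simp)]
          rw [ih (Bp :: c :: cs) (ranking ++ [(Ap.1, (parsed.countP (pvGT Ap.1 Bp.1) : Int))]) hlen'
              (fun p hp => hmem p (by simp at hp ⊢; tauto))]
          have : pvChainB P ((Ap :: Bp :: c :: cs).map (fun p => p.1))
              = (Ap.1, P.getD (Ap.1, Bp.1) 0) :: pvChainB P ((Bp :: c :: cs).map (fun p => p.1)) := by
            simp only [List.map_cons]
            rw [pvChainB]
            rw [if_pos (by rw [hPab, hPba]; exact hw)]
            rw [if_neg (by simp)]
          rw [this, hPab]
          simp
      · rw [if_neg hw]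
        cases rest with
        | nil =>
          have hk : k = 0 := by simpa using hlen
          subst hk
          simp only [List.length, pvLoopA]
          simp [pvChainB, hPab, hPba, hw]
        | cons c cs =>
          have hlen' : (Ap :: c :: cs).length = k + 1 := by simpa using hlen
          rw [if_neg (by simp)]
          rw [ih (Ap :: c :: cs) (ranking ++ [(Bp.1, (parsed.countP (pvGT Bp.1 Ap.1) : Int))]) hlen'
              (fun p hp => hmem p (by simp at hp ⊢; tauto))]
          have : pvChainB P ((Ap :: Bp :: c :: cs).map (fun p => p.1))
              = (Bp.1, P.getD (Bp.1, Ap.1) 0) :: pvChainB P ((Ap :: c :: cs).map (fun p => p.1)) := by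
            simp only [List.map_cons]
            rw [pvChainB]
            rw [if_neg (by rw [hPab, hPba]; exact hw)]
            rw [if_neg (by simp)]
          rw [this, hPba]
          simp

lemma pvFoldKeepsNodup (parsed : List (List (String × List (String × Int)))) (d : PySem.Dict String Int)
    (h : d.keys.Nodup) :
    ((parsed.foldl (fun t vote => (pvScores vote).foldl (fun t p => t.modify p.1 0 (· + p.2)) t) d).keys).Nodup := by
  induction parsed generalizing d with
  | nil => exact h
  | cons vote t ih =>
    simp only [List.foldl_cons]
    exact ih _ (PySem.Dict.nodup_keys_foldl_modify_key (pvScores vote) Prod.fst 0 (fun _ p => (· + p.2)) d h)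

-- ===== VERDICT (by name: the statement is the Claim_ definition above) =====
theorem star_voting_spec : Claim_equal_star_voting := by
  intro parsed option_names _hdom _hpre
  show star_voting parsed option_names = star_voting_alt parsed option_names
  simp only [star_voting, star_voting_alt, score_voting]
  set totals := parsed.foldl (fun t vote => (pvScores vote).foldl (fun t p => t.modify p.1 0 (· + p.2)) t)
      (option_names.foldl (fun d name => d.insert name 0) PySem.Dict.empty) with htot
  set T := PySem.List.sorted totals.items (fun x => x.2) true with hT
  by_cases hlen : (T.map (fun p => p.1)).length < 2
  · rw [if_pos hlen]
    have h0 : T.length - 1 = 0 := by simp at hlen; omega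
    rw [h0]
    rfl
  · rw [if_neg hlen]
    have hTlen : 2 ≤ T.length := by simp at hlen; omega
    have hndkeys : totals.keys.Nodup := by
      rw [htot]
      exact pvFoldKeepsNodup parsed _
        (PySem.Dict.nodup_keys_foldl_insert option_names (fun _ _ => 0) _ PySem.Dict.nodup_keys_empty)
    have hperm : (T.map (fun p => p.1)).Perm (totals.items.map (fun p => p.1)) :=
      (PySem.List.sorted_perm totals.items (fun x => x.2) true).map _
    have hnd : (T.map (fun p => p.1)).Nodup := hperm.nodup_iff.mpr hndkeys
    have hP : ∀ x ∈ T.map (fun p => p.1), ∀ y ∈ T.map (fun p => p.1),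
        (parsed.foldl (fun P ballot =>
            let s := PySem.Dict.mk (pvScores ballot)
            (T.map (fun p => p.1)).foldl (fun P a => (T.map (fun p => p.1)).foldl (fun P b =>
                if s.getD a 0 > s.getD b 0 then P.insert (a, b) (P.getD (a, b) 0 + 1) else P) P) P)
          PySem.Dict.empty).getD (x, y) 0 = (parsed.countP (pvGT x y) : Int) := by
      intro x hx y hy
      rw [pvMatrix_getD parsed _ hnd x y hx hy PySem.Dict.empty]
      simp [PySem.Dict.getD_empty]
    have hmain := pvLoop_eq_chain parsed (T.map (fun p => p.1)) _ hP (T.length - 1) T []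
      (by omega) (fun p hp => List.mem_map_of_mem hp)
    simpa using hmain
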